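-- pv_equiv track=rewrite | github.com/facebookresearch/DetectAndTrack | lib/datasets/json_dataset.py | _assign_shard_id_to_roidb
-- ===== SOURCE A (Python) =====
-- import math
--
-- def _assign_shard_id_to_roidb(roidb, num_splits, tot_vids):
--     """
--     Returns:
--         list with one element for each entry in roidb
--         (shard_dir_name,
--             (start_frame_id (0-indexed, included),
--              end_frame_id (0-indexed, not included)))
--     """
--     shards = []
--     vids_per_job = int(math.ceil(tot_vids / num_splits))
--     last_proc = 0
--     for start_id in range(num_splits):
--         this_end_pos = min(last_proc + vids_per_job, tot_vids + 1)
--         this_outdir = '{0:05d}_range_{1}_{2}'.format(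
--             start_id, last_proc, this_end_pos)
--         # run through the entries that get assigned to this shard, and set
--         # what frames out of it belong to which video.
--         last_frame_proc = 0
--         for i in range(last_proc, min(this_end_pos, len(roidb))):
--             # start_id is included and last_proc is not, as happens in the
--             # ROIDB_SUBSET code
--             this_frame_proc = last_frame_proc + roidb[i]['nframes']
--             shards.append((
--                 this_outdir, (last_frame_proc, this_frame_proc)))
--             last_frame_proc = this_frame_proc
--         last_proc = this_end_pos
--     return shards
-- ===== SOURCE B (Python) =====
-- import math
--
--
-- def _assign_shard_id_to_roidb(roidb, num_splits, tot_vids):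
--     """Single flat pass over the entries: compute each entry's shard as
--     i // vids_per_job and refresh the shard name / frame offset when the
--     shard index changes, instead of nesting a shard loop over an entry loop."""
--     vids_per_job = int(math.ceil(tot_vids / num_splits))
--     out = []
--     if num_splits <= 0 or vids_per_job <= 0:
--         return out
--     limit = min(len(roidb), tot_vids + 1, num_splits * vids_per_job)
--     shard = -1
--     outdir = ''
--     frame = 0
--     for i in range(limit):
--         k = i // vids_per_job
--         if k != shard:
--             shard = k
--             lo = k * vids_per_job
--             hi = min(lo + vids_per_job, tot_vids + 1)
--             outdir = '{0:05d}_range_{1}_{2}'.format(k, lo, hi)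
--             frame = 0
--         nf = roidb[i]['nframes']
--         out.append((outdir, (frame, frame + nf)))
--         frame += nf
--     return out
-- ===== Notes on version B (the rewrite author's own statement) =====
-- stated objective: alternative
-- what changed: Replaces A's nested loops (outer loop over shards carrying last_proc, inner loop over that shard's roidb entries) by one flat pass over entry indices 0..limit that derives each entry's shard as i // vids_per_job and recomputes the shard dir name and resets the frame offset only when that quotient changes.
import Mathlib
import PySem

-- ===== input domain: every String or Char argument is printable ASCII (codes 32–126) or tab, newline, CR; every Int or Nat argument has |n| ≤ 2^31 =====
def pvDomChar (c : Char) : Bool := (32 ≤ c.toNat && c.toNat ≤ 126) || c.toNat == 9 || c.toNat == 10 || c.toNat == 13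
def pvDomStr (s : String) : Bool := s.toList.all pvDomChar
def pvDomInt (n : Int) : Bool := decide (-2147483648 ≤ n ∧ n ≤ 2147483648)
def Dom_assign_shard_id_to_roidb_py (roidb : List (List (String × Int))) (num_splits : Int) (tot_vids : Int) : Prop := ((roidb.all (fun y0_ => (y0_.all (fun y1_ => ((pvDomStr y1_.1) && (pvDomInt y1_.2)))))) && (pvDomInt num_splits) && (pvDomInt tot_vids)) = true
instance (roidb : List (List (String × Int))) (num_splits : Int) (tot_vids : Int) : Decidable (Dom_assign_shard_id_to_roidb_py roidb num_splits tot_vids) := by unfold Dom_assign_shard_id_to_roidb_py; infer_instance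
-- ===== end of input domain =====

-- B replaces A's nested shard-loop/entry-loop with one flat pass over entry indices,
-- recomputing the shard name and resetting the frame offset whenever i // vids_per_job changes
-- (objective: alternative decomposition, same cost).


-- ===== PORT A =====
-- '{0:05d}_range_{1}_{2}'.format(sid, lo, hi); sid ≥ 0 at every call site, so zero-padding
-- to width 5 is plain left-padding (exact for the nonnegative shard ids both programs format).
def pvFmt (sid lo hi : Int) : String :=
  let s := PySem.Int.toStr sid
  String.ofList (List.replicate (5 - s.toList.length) '0' ++ s.toList
    ++ "_range_".toList ++ (PySem.Int.toStr lo).toList ++ "_".toList ++ (PySem.Int.toStr hi).toList)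

-- roidb[i]['nframes']: dict → association list, first match; Pre_ guarantees the key is
-- present at every accessed index, so the default 0 is never the value used.
def pvNfAt (roidb : List (List (String × Int))) (i : Int) : Int :=
  (List.lookup "nframes" ((PySem.List.pyGet? roidb i).getD [])).getD 0

-- body of A's inner 'for i in range(last_proc, min(this_end_pos, len(roidb)))' loop
def pvStepInner (roidb : List (List (String × Int))) (od : String)
    (st2 : List (String × (Int × Int)) × Int) (i : Int) : List (String × (Int × Int)) × Int :=
  (st2.1 ++ [(od, (st2.2, st2.2 + pvNfAt roidb i))], st2.2 + pvNfAt roidb i)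

-- body of A's outer 'for start_id in range(num_splits)' loop; state = (shards, last_proc)
def pvStepOuter (roidb : List (List (String × Int))) (tot_vids vpj : Int)
    (st : List (String × (Int × Int)) × Int) (start_id : Int) : List (String × (Int × Int)) × Int :=
  let this_end_pos := min (st.2 + vpj) (tot_vids + 1)
  let this_outdir := pvFmt start_id st.2 this_end_pos
  (((PySem.List.pyRange st.2 (min this_end_pos (roidb.length : Int)) 1).foldl
      (pvStepInner roidb this_outdir) (st.1, 0)).1,
   this_end_pos)

def assign_shard_id_to_roidb_py (roidb : List (List (String × Int))) (num_splits : Int) (tot_vids : Int) : List (String × (Int × Int)) :=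
  -- int(math.ceil(tot_vids / num_splits)) = ceiling division -((-tot_vids) // num_splits):
  -- exact on Dom's |n| ≤ 2^31 arguments (float error < distance to the next integer there)
  let vpj := -(PySem.Int.floordiv (-tot_vids) num_splits)
  ((PySem.List.pyRange 0 num_splits 1).foldl (pvStepOuter roidb tot_vids vpj) ([], 0)).1

-- ===== PORT B =====
-- '{0:05d}_range_{1}_{2}'.format(k, lo, hi) with lo = k*vpj, hi = min(lo+vpj, tot+1)
def pvName (tot_vids vpj k : Int) : String :=
  pvFmt k (k * vpj) (min (k * vpj + vpj) (tot_vids + 1))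

-- body of B's single 'for i in range(limit)' loop; state = (out, shard, outdir, frame)
def pvStepFlat (roidb : List (List (String × Int))) (tot_vids vpj : Int)
    (st : List (String × (Int × Int)) × Int × String × Int) (i : Int) :
    List (String × (Int × Int)) × Int × String × Int :=
  let k := PySem.Int.floordiv i vpj
  let cur : Int × String × Int := if k ≠ st.2.1 then (k, pvName tot_vids vpj k, 0) else st.2
  let nf := pvNfAt roidb i
  (st.1 ++ [(cur.2.1, (cur.2.2, cur.2.2 + nf))], cur.1, cur.2.1, cur.2.2 + nf)

def assign_shard_id_to_roidb_py_alt (roidb : List (List (String × Int))) (num_splits : Int) (tot_vids : Int) : List (String × (Int × Int)) :=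
  let vpj := -(PySem.Int.floordiv (-tot_vids) num_splits)
  if num_splits ≤ 0 ∨ vpj ≤ 0 then []
  else
    ((PySem.List.pyRange 0 (min (roidb.length : Int) (min (tot_vids + 1) (num_splits * vpj))) 1).foldl
        (pvStepFlat roidb tot_vids vpj) ([], -1, "", 0)).1

-- ===== PRECONDITION & SPEC =====
-- number of roidb entries A actually reads: min(len(roidb), tot_vids+1, num_splits*ceil(tot_vids/num_splits))
-- when num_splits > 0 and tot_vids > 0, else none
def pvPreN (roidb : List (List (String × Int))) (num_splits : Int) (tot_vids : Int) : Nat :=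
  if 0 < num_splits ∧ 0 < tot_vids then
    (min (roidb.length : Int)
      (min (tot_vids + 1) (num_splits * ((tot_vids + num_splits - 1) / num_splits)))).toNat
  else 0

-- Pre_ excludes exactly the inputs where the Python A raises: num_splits = 0 (ZeroDivisionError)
-- and a missing 'nframes' key in an entry A indexes (KeyError); it excludes nothing on which A returns.
def Pre_assign_shard_id_to_roidb_py (roidb : List (List (String × Int))) (num_splits : Int) (tot_vids : Int) : Prop :=
  num_splits ≠ 0 ∧
  ∀ e ∈ roidb.take (pvPreN roidb num_splits tot_vids), (List.lookup "nframes" e).isSome = true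
instance (roidb : List (List (String × Int))) (num_splits : Int) (tot_vids : Int) : Decidable (Pre_assign_shard_id_to_roidb_py roidb num_splits tot_vids) := by unfold Pre_assign_shard_id_to_roidb_py; infer_instance

def pvWitness_assign_shard_id_to_roidb_py : (List (List (String × Int))) × Int × Int :=
  ([[("nframes", 2)], [("nframes", 3)], [("nframes", 1)]], 2, 3)

def Spec_assign_shard_id_to_roidb_py (roidb : List (List (String × Int))) (num_splits : Int) (tot_vids : Int) (out : List (String × (Int × Int))) : Prop := out = assign_shard_id_to_roidb_py_alt roidb num_splits tot_vids
instance (roidb : List (List (String × Int))) (num_splits : Int) (tot_vids : Int) (out : List (String × (Int × Int))) : Decidable (Spec_assign_shard_id_to_roidb_py roidb num_splits tot_vids out) := by unfold Spec_assign_shard_id_to_roidb_py; infer_instance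

-- ===== CLAIM (what is proved, stated in full; the proofs are below) =====
def Claim_equal_assign_shard_id_to_roidb_py : Prop := ∀ (roidb : List (List (String × Int))) (num_splits : Int) (tot_vids : Int), Dom_assign_shard_id_to_roidb_py roidb num_splits tot_vids → Pre_assign_shard_id_to_roidb_py roidb num_splits tot_vids → Spec_assign_shard_id_to_roidb_py roidb num_splits tot_vids (assign_shard_id_to_roidb_py roidb num_splits tot_vids)

-- ===== LEMMAS AND PROOFS =====

-- partial frame sums: pvSum roidb a n = Σ_{t<n} nframes(roidb[a+t])
def pvSum (roidb : List (List (String × Int))) (a : Int) : Nat → Int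
  | 0 => 0
  | n + 1 => pvSum roidb a n + pvNfAt roidb (a + n)

-- what A's inner loop emits for a block of n entries starting at index a with frame offset c
def pvEmit (roidb : List (List (String × Int))) (od : String) : Int → Nat → Int → List (String × (Int × Int))
  | _, 0, _ => []
  | a, n + 1, c => (od, (c, c + pvNfAt roidb a)) :: pvEmit roidb od (a + 1) n (c + pvNfAt roidb a)

-- the common closed form: the entry both programs produce for roidb index i
def pvEntry (roidb : List (List (String × Int))) (tot_vids vpj : Int) (i : Int) : String × (Int × Int) :=
  let k := PySem.Int.floordiv i vpj
  let off := pvSum roidb (k * vpj) (i - k * vpj).toNat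
  (pvName tot_vids vpj k, (off, off + pvNfAt roidb i))

theorem pvSum_shift (roidb : List (List (String × Int))) (a : Int) (n : Nat) :
    pvSum roidb a (n + 1) = pvNfAt roidb a + pvSum roidb (a + 1) n := by
  induction n with
  | zero => simp [pvSum]
  | succ n ih =>
    have h : a + (↑n + 1) = (a + 1) + ↑n := by ring
    calc pvSum roidb a (n + 1 + 1) = pvSum roidb a (n + 1) + pvNfAt roidb (a + (n + 1)) := rfl
      _ = pvNfAt roidb a + (pvSum roidb (a + 1) n + pvNfAt roidb ((a + 1) + n)) := by
          rw [ih, h]; ring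
      _ = pvNfAt roidb a + pvSum roidb (a + 1) (n + 1) := rfl

theorem inner_fold (roidb : List (List (String × Int))) (od : String) (n : Nat) :
    ∀ (a c : Int) (acc : List (String × (Int × Int))),
    (PySem.List.pyRange a (a + n) 1).foldl (pvStepInner roidb od) (acc, c) =
      (acc ++ pvEmit roidb od a n c, c + pvSum roidb a n) := by
  induction n with
  | zero =>
    intro a c acc
    simp [pvEmit, pvSum]
  | succ n ih =>
    intro a c acc
    have hr : PySem.List.pyRange a (a + ((n:Nat) + 1 : Nat)) 1
        = a :: PySem.List.pyRange (a + 1) ((a + 1) + (n : Nat)) 1 := by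
      rw [PySem.List.pyRange_one_cons (by push_cast; omega)]
      congr 1
      push_cast; ring_nf
    rw [hr]
    simp only [List.foldl_cons]
    have hstep : pvStepInner roidb od (acc, c) a
        = (acc ++ [(od, (c, c + pvNfAt roidb a))], c + pvNfAt roidb a) := rfl
    rw [hstep, ih (a + 1) (c + pvNfAt roidb a)]
    rw [pvSum_shift]
    rw [Prod.mk.injEq]
    refine ⟨?_, by ring⟩
    simp [pvEmit]

theorem emit_eq_map (roidb : List (List (String × Int))) (tot_vids vpj k : Int) (hv : 1 ≤ vpj) (n : Nat) :
    ∀ a : Int, k * vpj ≤ a → a + n ≤ k * vpj + vpj →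
    pvEmit roidb (pvName tot_vids vpj k) a n (pvSum roidb (k * vpj) (a - k * vpj).toNat) =
      (PySem.List.pyRange a (a + n) 1).map (pvEntry roidb tot_vids vpj) := by
  induction n with
  | zero =>
    intro a _ _
    simp [pvEmit]
  | succ n ih =>
    intro a h1 h2
    have ha2 : a < (k + 1) * vpj := by rw [add_one_mul]; push_cast at h2; omega
    have hKa : PySem.Int.floordiv a vpj = k :=
      (PySem.Int.floordiv_eq_iff_of_pos (by omega)).mpr ⟨h1, ha2⟩
    have hm : ((a + 1) - k * vpj).toNat = (a - k * vpj).toNat + 1 := by omega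
    have hbase : k * vpj + ((a - k * vpj).toNat : Int) = a := by omega
    have hc : pvSum roidb (k * vpj) (a - k * vpj).toNat + pvNfAt roidb a
        = pvSum roidb (k * vpj) ((a + 1) - k * vpj).toNat := by
      rw [hm]
      show _ = pvSum roidb (k * vpj) (a - k * vpj).toNat
            + pvNfAt roidb (k * vpj + ((a - k * vpj).toNat : Int))
      rw [hbase]
    have hr : PySem.List.pyRange a (a + ((n:Nat) + 1 : Nat)) 1
        = a :: PySem.List.pyRange (a + 1) ((a + 1) + (n : Nat)) 1 := by
      rw [PySem.List.pyRange_one_cons (by push_cast; omega)]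
      congr 1
      push_cast; ring_nf
    rw [hr, List.map_cons]
    simp only [pvEmit]
    have htail : pvEmit roidb (pvName tot_vids vpj k) (a + 1) n
          (pvSum roidb (k * vpj) (a - k * vpj).toNat + pvNfAt roidb a)
        = (PySem.List.pyRange (a + 1) ((a + 1) + (n : Nat)) 1).map (pvEntry roidb tot_vids vpj) := by
      rw [hc]
      exact ih (a + 1) (by omega) (by push_cast at h2 ⊢; omega)
    have hhead : pvEntry roidb tot_vids vpj a
        = (pvName tot_vids vpj k, (pvSum roidb (k * vpj) (a - k * vpj).toNat,
            pvSum roidb (k * vpj) (a - k * vpj).toNat + pvNfAt roidb a)) := by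
      simp [pvEntry, hKa]
    rw [htail, hhead]

theorem outer_trivial (roidb : List (List (String × Int))) (tot_vids vpj : Int) (hv : vpj ≤ 0) (l : List Int) :
    ∀ (acc : List (String × (Int × Int))) (lp : Int),
    (l.foldl (pvStepOuter roidb tot_vids vpj) (acc, lp)).1 = acc := by
  induction l with
  | nil => intro acc lp; rfl
  | cons h tl ih =>
    intro acc lp
    simp only [List.foldl_cons]
    have hr : PySem.List.pyRange lp (min (min (lp + vpj) (tot_vids + 1)) ((roidb.length : Int))) 1 = [] := by
      rw [PySem.List.pyRange_one]
      have h0 : (min (min (lp + vpj) (tot_vids + 1)) ((roidb.length : Int)) - lp).toNat = 0 := by omega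
      rw [h0]; simp
    have hstep : pvStepOuter roidb tot_vids vpj (acc, lp) h = (acc, min (lp + vpj) (tot_vids + 1)) := by
      simp only [pvStepOuter]
      rw [hr]
      rfl
    rw [hstep]
    exact ih acc _

theorem outer_fold (roidb : List (List (String × Int))) (tot_vids vpj : Int)
    (hv : 1 ≤ vpj) (ht : 0 ≤ tot_vids) (k : Nat) :
    (PySem.List.pyRange 0 (k : Int) 1).foldl (pvStepOuter roidb tot_vids vpj) ([], 0) =
      ((PySem.List.pyRange 0 (min (min ((k : Int) * vpj) (tot_vids + 1)) (roidb.length : Int)) 1).map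
          (pvEntry roidb tot_vids vpj),
        min ((k : Int) * vpj) (tot_vids + 1)) := by
  induction k with
  | zero =>
    have e0 : PySem.List.pyRange 0 ((0:Nat) : Int) 1 = [] := by
      rw [PySem.List.pyRange_one]; simp
    have e1 : min (min (((0:Nat) : Int) * vpj) (tot_vids + 1)) ((roidb.length : Int)) = 0 := by
      simp only [Nat.cast_zero, zero_mul]
      omega
    have e2 : min (((0:Nat) : Int) * vpj) (tot_vids + 1) = 0 := by
      simp only [Nat.cast_zero, zero_mul]
      omega
    rw [e0, e1, e2]
    rw [show PySem.List.pyRange 0 0 1 = [] from by rw [PySem.List.pyRange_one]; simp]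
    rfl
  | succ k ih =>
    have hcast : ((k + 1 : Nat) : Int) = (k : Int) + 1 := by push_cast; ring
    have hmul : ((k : Int) + 1) * vpj = (k : Int) * vpj + vpj := by ring
    rw [hcast, PySem.List.pyRange_one_succ_right (by positivity), List.foldl_append, ih,
      List.foldl_cons, List.foldl_nil, hmul]
    have hend : min (min ((k : Int) * vpj) (tot_vids + 1) + vpj) (tot_vids + 1)
        = min ((k : Int) * vpj + vpj) (tot_vids + 1) := by omega
    simp only [pvStepOuter, hend]
    by_cases hc : min (min ((k : Int) * vpj + vpj) (tot_vids + 1)) ((roidb.length : Int))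
        ≤ min ((k : Int) * vpj) (tot_vids + 1)
    · -- this shard contributes no entries
      have hr : PySem.List.pyRange (min ((k : Int) * vpj) (tot_vids + 1))
          (min (min ((k : Int) * vpj + vpj) (tot_vids + 1)) ((roidb.length : Int))) 1 = [] := by
        rw [PySem.List.pyRange_one]
        rw [show (min (min ((k : Int) * vpj + vpj) (tot_vids + 1)) ((roidb.length : Int))
          - min ((k : Int) * vpj) (tot_vids + 1)).toNat = 0 from by omega]
        simp
      rw [hr]
      have hb : min (min ((k : Int) * vpj + vpj) (tot_vids + 1)) ((roidb.length : Int))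
          = min (min ((k : Int) * vpj) (tot_vids + 1)) ((roidb.length : Int)) := by omega
      rw [hb]
      rfl
    · -- nonempty block: last_proc is not capped, so it equals k*vpj
      rw [not_le] at hc
      have hA : min ((k : Int) * vpj) (tot_vids + 1) = (k : Int) * vpj := by omega
      set a := (k : Int) * vpj with ha
      set b := min (min (a + vpj) (tot_vids + 1)) ((roidb.length : Int)) with hbdef
      have hn : b = a + ((b - a).toNat : Nat) := by omega
      rw [hA, hn, inner_fold]
      have hz : ((a - (k : Int) * vpj).toNat) = 0 := by omega
      have hemit := emit_eq_map roidb tot_vids vpj (k : Int) hv (b - a).toNat a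
        (le_refl a) (by omega)
      rw [hz] at hemit
      have hod : pvFmt (k : Int) a (min (a + vpj) (tot_vids + 1)) = pvName tot_vids vpj (k : Int) := rfl
      rw [show pvSum roidb ((k : Int) * vpj) 0 = 0 from rfl] at hemit
      rw [hod, hemit]
      have hsplit : PySem.List.pyRange 0 (a + ((b - a).toNat : Int)) 1
          = PySem.List.pyRange 0 a 1 ++ PySem.List.pyRange a (a + ((b - a).toNat : Int)) 1 :=
        PySem.List.pyRange_one_append 0 a _ (by positivity) (by omega)
      rw [Prod.mk.injEq]
      constructor
      · rw [show min a ((roidb.length : Int)) = a from by omega, hsplit, List.map_append]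
      · rfl

theorem flat_fold (roidb : List (List (String × Int))) (tot_vids vpj : Int) (hv : 1 ≤ vpj) (i : Nat) :
    (PySem.List.pyRange 0 (i : Int) 1).foldl (pvStepFlat roidb tot_vids vpj) ([], -1, "", 0) =
      ((PySem.List.pyRange 0 (i : Int) 1).map (pvEntry roidb tot_vids vpj),
        if i = 0 then (-1, "", 0)
        else (PySem.Int.floordiv (i - 1) vpj,
              pvName tot_vids vpj (PySem.Int.floordiv (i - 1) vpj),
              (pvEntry roidb tot_vids vpj (i - 1)).2.2)) := by
  induction i with
  | zero =>
    rw [show PySem.List.pyRange 0 ((0:Nat) : Int) 1 = [] from by rw [PySem.List.pyRange_one]; simp]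
    rfl
  | succ i ih =>
    have hcast : ((i + 1 : Nat) : Int) = (i : Int) + 1 := by push_cast; ring
    rw [hcast, PySem.List.pyRange_one_succ_right (by positivity), List.foldl_append, ih,
      List.foldl_cons, List.foldl_nil, List.map_append, List.map_cons, List.map_nil,
      if_neg (Nat.succ_ne_zero i)]
    simp only [add_sub_cancel_right]
    rcases Nat.eq_zero_or_pos i with hi0 | hip
    · subst hi0
      have h0 : PySem.Int.floordiv 0 vpj = 0 := by
        rw [PySem.Int.floordiv_eq_iff_of_pos (by omega)]
        refine ⟨by simp, by simp; omega⟩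
      rw [show PySem.List.pyRange 0 ((0:Nat) : Int) 1 = [] from by rw [PySem.List.pyRange_one]; simp]
      simp only [Nat.cast_zero, List.map_nil, List.nil_append]
      simp [pvStepFlat, pvEntry, h0, pvSum]
    · rw [if_neg (by omega : ¬ i = 0)]
      set q1 := PySem.Int.floordiv ((i : Int) - 1) vpj with hq1
      set q := PySem.Int.floordiv (i : Int) vpj with hq
      have hb1 : q1 * vpj ≤ (i : Int) - 1 ∧ (i : Int) - 1 < (q1 + 1) * vpj :=
        (PySem.Int.floordiv_eq_iff_of_pos (by omega)).mp hq1.symm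
      have hb : q * vpj ≤ (i : Int) ∧ (i : Int) < (q + 1) * vpj :=
        (PySem.Int.floordiv_eq_iff_of_pos (by omega)).mp hq.symm
      have hE : pvEntry roidb tot_vids vpj (i : Int)
          = (pvName tot_vids vpj q, (pvSum roidb (q * vpj) (((i : Int) - q * vpj).toNat),
             pvSum roidb (q * vpj) (((i : Int) - q * vpj).toNat) + pvNfAt roidb (i : Int))) := by
        simp only [pvEntry, ← hq]
      by_cases hk : q = q1
      · -- same shard: the cached name and frame offset are reused
        have hQ : q * vpj ≤ (i : Int) - 1 := by rw [hk]; exact hb1.1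
        have hoff : (pvEntry roidb tot_vids vpj ((i : Int) - 1)).2.2
            = pvSum roidb (q * vpj) (((i : Int) - q * vpj).toNat) := by
          simp only [pvEntry, ← hq1, ← hk]
          have hm : (((i : Int) - q * vpj).toNat) = ((((i : Int) - 1) - q * vpj).toNat) + 1 := by
            omega
          rw [hm]
          show _ = pvSum roidb (q * vpj) (((( i : Int) - 1) - q * vpj).toNat)
              + pvNfAt roidb (q * vpj + (((((i : Int) - 1) - q * vpj).toNat) : Int))
          rw [show q * vpj + (((((i : Int) - 1) - q * vpj).toNat) : Int) = (i : Int) - 1 from by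
            omega]
        simp only [pvStepFlat, ← hq, hE, hoff]
        simp [hk]
      · -- new shard: i is the first multiple of vpj in its block, frame offset restarts at 0
        have hstart : (i : Int) = q * vpj := by
          rcases lt_or_eq_of_le hb.1 with hlt | heq
          · exfalso
            have heq1 : PySem.Int.floordiv ((i : Int) - 1) vpj = q :=
              (PySem.Int.floordiv_eq_iff_of_pos (by omega)).mpr ⟨by omega, by omega⟩
            exact hk (by rw [hq1, heq1])
          · omega
        have hoff0 : pvSum roidb (q * vpj) (((i : Int) - q * vpj).toNat) = 0 := by
          rw [show (((i : Int) - q * vpj).toNat) = 0 from by omega]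
          rfl
        simp only [pvStepFlat, ← hq, hE, hoff0]
        simp [hk]

-- ===== VERDICT (by name: the statement is the Claim_ definition above) =====
theorem assign_shard_id_to_roidb_py_spec : Claim_equal_assign_shard_id_to_roidb_py := by
  intro roidb ns tot _ hpre
  unfold Spec_assign_shard_id_to_roidb_py
  unfold assign_shard_id_to_roidb_py assign_shard_id_to_roidb_py_alt
  set vpj := -(PySem.Int.floordiv (-tot) ns) with hvpj
  by_cases hns : ns ≤ 0
  · rw [show PySem.List.pyRange 0 ns 1 = [] from by
      rw [PySem.List.pyRange_one, show (ns - 0).toNat = 0 from by omega]; simp]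
    rw [if_pos (Or.inl hns)]
    rfl
  · by_cases hvp : vpj ≤ 0
    · rw [if_pos (Or.inr hvp)]
      exact outer_trivial roidb tot vpj hvp _ [] 0
    · have hv1 : 1 ≤ vpj := by omega
      have hbb : (vpj - 1) * ns < tot ∧ tot ≤ vpj * ns :=
        (PySem.Int.neg_floordiv_neg_eq_iff_of_pos (by omega)).mp hvpj.symm
      have ht : 0 ≤ tot := by nlinarith [hbb.1]
      rw [if_neg (by omega)]
      set L := min ((roidb.length : Int)) (min (tot + 1) (ns * vpj)) with hL
      have hL0 : 0 ≤ L := by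
        have : 0 ≤ ns * vpj := mul_nonneg (by omega) (by omega)
        omega
      have hA := outer_fold roidb tot vpj hv1 ht ns.toNat
      rw [show ((ns.toNat : Nat) : Int) = ns from by omega] at hA
      have hB := flat_fold roidb tot vpj hv1 L.toNat
      rw [show ((L.toNat : Nat) : Int) = L from by omega] at hB
      rw [congrArg Prod.fst hA, congrArg Prod.fst hB]
      have hbound : min (min (ns * vpj) (tot + 1)) ((roidb.length : Int)) = L := by
        rw [hL]; omega
      rw [hbound]
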